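-- pv_equiv track=rewrite | github.com/alexander-kireev/python_dsa_2 | second_iteration/section_18/ex_57_item_in_common.py | item_in_common
-- ===== SOURCE A (Python) =====
-- def item_in_common(l1, l2):
--     found = {}
--
--     for i in l1:
--         found[i] = True
--
--     for i in l2:
--         if i in found:
--             return True
--
--     return False
-- ===== SOURCE B (Python) =====
-- def item_in_common(l1, l2):
--     # Sort both lists and run a two-pointer merge scan: advance the pointer
--     # behind the smaller head; equal heads mean a shared element.
--     a = sorted(l1)
--     b = sorted(l2)
--     i = j = 0
--     while i < len(a) and j < len(b):
--         if a[i] == b[j]: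
--             return True
--         if a[i] < b[j]:
--             i += 1
--         else:
--             j += 1
--     return False
-- ===== Notes on version B (the rewrite author's own statement) =====
-- stated objective: alternative
-- what changed: Replaces the hash index (dict of l1 plus an early-return membership scan of l2) with a sort-based algorithm: sort both lists and run a two-pointer merge scan that advances behind the smaller head until it sees equal heads.
import Mathlib
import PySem

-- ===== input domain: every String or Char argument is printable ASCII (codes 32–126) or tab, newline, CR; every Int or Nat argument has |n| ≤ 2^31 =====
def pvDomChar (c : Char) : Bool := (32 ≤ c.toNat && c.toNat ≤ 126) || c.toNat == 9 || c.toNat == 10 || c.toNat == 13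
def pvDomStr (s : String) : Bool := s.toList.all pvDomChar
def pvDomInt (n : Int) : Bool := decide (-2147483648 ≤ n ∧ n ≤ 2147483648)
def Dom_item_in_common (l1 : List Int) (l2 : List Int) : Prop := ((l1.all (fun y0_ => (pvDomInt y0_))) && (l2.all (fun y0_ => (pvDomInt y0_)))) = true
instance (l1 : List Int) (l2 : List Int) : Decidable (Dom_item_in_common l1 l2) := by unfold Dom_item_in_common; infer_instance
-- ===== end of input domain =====

-- B replaces A's hash index + membership scan with sort-both-lists + a two-pointer merge scan; objective: alternative.


-- ===== PORT A =====
-- A's second loop: 'for i in l2: if i in found: return True' then 'return False'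
def itemScan (found : PySem.Dict Int Bool) : List Int → Bool
  | [] => false
  | i :: rest => if found.contains i then true else itemScan found rest

def item_in_common (l1 : List Int) (l2 : List Int) : Bool :=
  let found := l1.foldl (fun d i => d.insert i true) PySem.Dict.empty
  itemScan found l2

-- ===== PORT B =====
-- B's while loop as recursion on the two sorted lists (the two pointers become the remaining suffixes)
def mergeScan : List Int → List Int → Bool
  | [], _ => false
  | _ :: _, [] => false
  | a :: as_, b :: bs =>
    if a == b then true
    else if a < b then mergeScan as_ (b :: bs)
    else mergeScan (a :: as_) bs

def item_in_common_alt (l1 : List Int) (l2 : List Int) : Bool :=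
  mergeScan (PySem.List.sorted l1 (fun x => x) false) (PySem.List.sorted l2 (fun x => x) false)

-- ===== PRECONDITION & SPEC =====
def Spec_item_in_common (l1 : List Int) (l2 : List Int) (out : Bool) : Prop := out = item_in_common_alt l1 l2
instance (l1 : List Int) (l2 : List Int) (out : Bool) : Decidable (Spec_item_in_common l1 l2 out) := by unfold Spec_item_in_common; infer_instance

-- ===== CLAIM (what is proved, stated in full; the proofs are below) =====
def Claim_equal_item_in_common : Prop := ∀ (l1 : List Int) (l2 : List Int), Dom_item_in_common l1 l2 → Spec_item_in_common l1 l2 (item_in_common l1 l2)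

-- ===== LEMMAS AND PROOFS =====

-- A's scan returns true iff some element of l2 is a key of found
theorem itemScan_eq_true_iff (found : PySem.Dict Int Bool) (l : List Int) :
    itemScan found l = true ↔ ∃ x ∈ l, found.contains x = true := by
  induction l with
  | nil => simp [itemScan]
  | cons i rest ih =>
    by_cases h : found.contains i = true
    · simp [itemScan, h]
    · simp [itemScan, h, ih]

theorem contains_found (l1 : List Int) (x : Int) :
    (l1.foldl (fun d i => d.insert i true) PySem.Dict.empty).contains x = true ↔ x ∈ l1 := by
  rw [PySem.Dict.contains_iff_mem_keys, PySem.Dict.keys_foldl_insert]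
  simp [PySem.Dict.keys_empty, PySem.Set.mem_update]

-- on sorted lists the merge scan decides whether the lists share an element
theorem mergeScan_iff (xs ys : List Int)
    (hx : xs.Pairwise (· ≤ ·)) (hy : ys.Pairwise (· ≤ ·)) :
    mergeScan xs ys = true ↔ ∃ x ∈ xs, x ∈ ys := by
  fun_induction mergeScan xs ys with
  | case1 ys => simp
  | case2 a as_ => simp
  | case3 a as_ b bs heq =>
    have : a = b := by simpa using heq
    subst this
    simp
  | case4 a as_ b bs heq hlt ih =>
    rw [List.pairwise_cons] at hx
    have ih' := ih hx.2 hy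
    rw [ih']
    constructor
    · rintro ⟨x, hx1, hx2⟩; exact ⟨x, List.mem_cons_of_mem _ hx1, hx2⟩
    · rintro ⟨x, hx1, hx2⟩
      rcases List.mem_cons.mp hx1 with rfl | hx1
      · exfalso
        rcases List.mem_cons.mp hx2 with rfl | hx2
        · simp at heq
        · have := (List.pairwise_cons.mp hy).1 x hx2
          omega
      · exact ⟨x, hx1, hx2⟩
  | case5 a as_ b bs heq hlt ih =>
    rw [List.pairwise_cons] at hy
    have ih' := ih hx hy.2
    have hba : b < a := by
      have hne : a ≠ b := by simpa using heq
      omega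
    rw [ih']
    constructor
    · rintro ⟨x, hx1, hx2⟩; exact ⟨x, hx1, List.mem_cons_of_mem _ hx2⟩
    · rintro ⟨x, hx1, hx2⟩
      rcases List.mem_cons.mp hx2 with rfl | hx2
      · exfalso
        rcases List.mem_cons.mp hx1 with rfl | hx1
        · omega
        · have := (List.pairwise_cons.mp hx).1 x hx1
          omega
      · exact ⟨x, hx1, hx2⟩

-- ===== VERDICT (by name: the statement is the Claim_ definition above) =====
theorem item_in_common_spec : Claim_equal_item_in_common := by
  intro l1 l2 _
  unfold Spec_item_in_common
  have hiff : item_in_common l1 l2 = true ↔ item_in_common_alt l1 l2 = true := by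
    unfold item_in_common item_in_common_alt
    rw [itemScan_eq_true_iff,
        mergeScan_iff _ _ (PySem.List.sorted_pairwise l1 (fun x => x))
          (PySem.List.sorted_pairwise l2 (fun x => x))]
    constructor
    · rintro ⟨x, h2, hc⟩
      exact ⟨x, (PySem.List.mem_sorted _ _ _ _).mpr ((contains_found l1 x).mp hc),
               (PySem.List.mem_sorted _ _ _ _).mpr h2⟩
    · rintro ⟨x, h1, h2⟩
      exact ⟨x, (PySem.List.mem_sorted _ _ _ _).mp h2,
               (contains_found l1 x).mpr ((PySem.List.mem_sorted _ _ _ _).mp h1)⟩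
  cases h : item_in_common_alt l1 l2 with
  | false => rw [Bool.eq_false_iff]; intro hc; rw [hiff.mp hc] at h; simp at h
  | true => exact hiff.mpr h
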